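-- pv_equiv track=rewrite | github.com/controversial/ui2 | ui2/kb_shortcuts.py | _tokenize_shortcut_string
-- ===== SOURCE A (Python) =====
-- _modifiers = {
--     "shift": 1 << 17,
--     "control": 1 << 18, "ctrl": 1 << 18,
--     "option": 1 << 19, "alt": 1 << 19,
--     "command": 1 << 20, "cmd": 1 << 20
-- }
--
-- def _tokenize_shortcut_string(shortcut):
--     """Split a plaintext string representing a keyboard shortcut into each
--     individual key in the shortcut.
--
--     Valid separator characters are any combination of " ", "+", "-", and ",".
--     """
--     # Tokenize the string
--     out = [shortcut]
--     for separator in (" ", "-", "+", ","):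
--         new = []
--         for piece in out:
--             new.extend(piece.split(separator))
--         out = new[:]
--     tokens = [i.strip().lower() for i in out if i.strip().lower()]
--     # Sort the tokens to place modifiers first
--     return sorted(tokens, key=lambda tok: tok not in _modifiers)
-- ===== SOURCE B (Python) =====
-- _modifiers = {
--     "shift": 1 << 17,
--     "control": 1 << 18, "ctrl": 1 << 18,
--     "option": 1 << 19, "alt": 1 << 19,
--     "command": 1 << 20, "cmd": 1 << 20
-- }
--
-- def _tokenize_shortcut_string(shortcut):
--     """Single-pass scanner over the string instead of repeated re-splitting,
--     and a stable two-bucket partition instead of a key sort."""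
--     tokens = []
--     cur = []
--     for ch in shortcut:
--         if ch in " -+,":
--             t = "".join(cur).strip().lower()
--             if t:
--                 tokens.append(t)
--             cur = []
--         else:
--             cur.append(ch)
--     t = "".join(cur).strip().lower()
--     if t:
--         tokens.append(t)
--     mods = [t for t in tokens if t in _modifiers]
--     rest = [t for t in tokens if t not in _modifiers]
--     return mods + rest
-- ===== Notes on version B (the rewrite author's own statement) =====
-- stated objective: simpler
-- what changed: B tokenizes in one character-by-character pass (accumulating the current chunk and flushing on any of the four separator characters) instead of A's four successive re-splitting passes over a growing list of pieces, and replaces the stable boolean-key sort with a stable two-bucket partition (modifier tokens then the rest).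
import Mathlib
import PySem

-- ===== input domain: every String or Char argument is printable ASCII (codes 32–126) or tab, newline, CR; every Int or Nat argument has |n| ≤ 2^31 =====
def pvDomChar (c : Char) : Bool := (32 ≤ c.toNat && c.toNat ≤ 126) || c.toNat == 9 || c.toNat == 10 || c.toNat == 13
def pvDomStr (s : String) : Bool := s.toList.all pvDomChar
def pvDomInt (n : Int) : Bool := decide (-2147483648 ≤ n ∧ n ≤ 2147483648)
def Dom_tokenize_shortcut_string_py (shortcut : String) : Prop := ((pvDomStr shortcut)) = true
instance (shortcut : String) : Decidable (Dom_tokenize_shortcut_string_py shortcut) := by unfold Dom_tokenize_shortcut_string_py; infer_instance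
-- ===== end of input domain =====

-- B replaces A's four re-splitting passes by a single character scanner and the
-- stable boolean-key sort by a stable two-bucket partition (objective: simpler).

-- ===== PORT A =====
-- the module-level _modifiers dict (values 1<<17 … 1<<20)
def pvModifiers : PySem.Dict String Int :=
  PySem.Dict.mk [("shift", 131072), ("control", 262144), ("ctrl", 262144),
                 ("option", 524288), ("alt", 524288), ("command", 1048576), ("cmd", 1048576)]

-- piece.split(separator) for the literal nonempty separators A uses (exact: PySem.Chars.splitOn)
def pvStrSplit (s sep : String) : List String :=
  (PySem.Chars.splitOn s.toList sep.toList).map String.ofList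

def tokenize_shortcut_string_py (shortcut : String) : List String :=
  -- out = [shortcut]; for separator in (" ", "-", "+", ","): new = []; for piece in out: new.extend(piece.split(separator)); out = new[:]
  let out := [(" " : String), "-", "+", ","].foldl
    (fun out sep => out.foldl (fun new piece => new ++ pvStrSplit piece sep) []) [shortcut]
  -- tokens = [i.strip().lower() for i in out if i.strip().lower()]
  let tokens := (out.filter (fun i => !(PySem.Str.lower (PySem.Str.strip i) == ""))).map
    (fun i => PySem.Str.lower (PySem.Str.strip i))
  -- sorted(tokens, key=lambda tok: tok not in _modifiers)
  PySem.List.sorted tokens (fun tok => !(pvModifiers.contains tok)) false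

-- ===== PORT B =====
def pvIsSep (c : Char) : Bool := c == ' ' || c == '-' || c == '+' || c == ','

-- t = "".join(cur).strip().lower(); if t: tokens.append(t)
def pvFlush (cur : List Char) : List String :=
  let t := PySem.Chars.lower (PySem.Chars.strip cur)
  if t.isEmpty then [] else [String.ofList t]

-- the scanner loop over the characters, state = (emitted tokens, cur)
def pvScan (cur : List Char) : List Char → List String
  | [] => pvFlush cur
  | c :: cs => if pvIsSep c then pvFlush cur ++ pvScan [] cs else pvScan (cur ++ [c]) cs

def tokenize_shortcut_string_py_alt (shortcut : String) : List String :=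
  let tokens := pvScan [] shortcut.toList
  -- mods = [t for t in tokens if t in _modifiers]; rest = [t for t in tokens if t not in _modifiers]; mods + rest
  tokens.filter (fun t => pvModifiers.contains t)
    ++ tokens.filter (fun t => !(pvModifiers.contains t))

-- ===== PRECONDITION & SPEC =====
def Spec_tokenize_shortcut_string_py (shortcut : String) (out : List String) : Prop := out = tokenize_shortcut_string_py_alt shortcut
instance (shortcut : String) (out : List String) : Decidable (Spec_tokenize_shortcut_string_py shortcut out) := by unfold Spec_tokenize_shortcut_string_py; infer_instance

-- ===== CLAIM (what is proved, stated in full; the proofs are below) =====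
def Claim_equal_tokenize_shortcut_string_py : Prop := ∀ (shortcut : String), Dom_tokenize_shortcut_string_py shortcut → Spec_tokenize_shortcut_string_py shortcut (tokenize_shortcut_string_py shortcut)

-- ===== LEMMAS AND PROOFS =====

-- normalization of one chunk, and its Option form
def pvNorm? (cs : List Char) : Option String :=
  let t := PySem.Chars.lower (PySem.Chars.strip cs)
  if t.isEmpty then none else some (String.ofList t)

theorem pvFlush_eq (cur : List Char) : pvFlush cur = (pvNorm? cur).toList := by
  by_cases h : (PySem.Chars.lower (PySem.Chars.strip cur)).isEmpty <;> simp [pvFlush, pvNorm?, h]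

theorem pv_modifyHead_append {α : Type} (f : α → α) (xs ys : List α) (h : xs ≠ []) :
    List.modifyHead f (xs ++ ys) = List.modifyHead f xs ++ ys := by
  cases xs with
  | nil => exact absurd rfl h
  | cons a l => simp

-- PySem.Chars.splitOn with a single-character separator is List.splitOnP
theorem pv_splitOn_go_single (c : Char) :
    ∀ (fuel : Nat) (l cur : List Char) (acc : List (List Char)), l.length < fuel →
      PySem.Chars.splitOn.go [c] fuel l cur acc
        = acc.reverse ++ List.modifyHead (cur.reverse ++ ·) (List.splitOnP (fun a => c == a) l) := by
  intro fuel
  induction fuel with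
  | zero => intro l cur acc h; omega
  | succ n ih =>
    intro l cur acc h
    cases l with
    | nil => simp [PySem.Chars.splitOn.go, List.splitOnP_nil]
    | cons a rest =>
      by_cases hca : c = a
      · subst hca
        have : PySem.Chars.splitOn.go [c] (n+1) (c :: rest) cur acc
            = PySem.Chars.splitOn.go [c] n rest [] (cur.reverse :: acc) := by
          simp [PySem.Chars.splitOn.go, List.isPrefixOf]
        rw [this, ih rest [] (cur.reverse :: acc) (by simpa using Nat.lt_of_succ_lt_succ h)]
        rw [List.splitOnP_cons]
        simp only [beq_self_eq_true, List.reverse_cons, List.append_assoc, List.singleton_append]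
        cases hsp : List.splitOnP (fun a => c == a) rest with
        | nil => exact absurd hsp (List.splitOnP_ne_nil _ _)
        | cons x xs => simp
      · have hb : (c == a) = false := by simp [hca]
        have : PySem.Chars.splitOn.go [c] (n+1) (a :: rest) cur acc
            = PySem.Chars.splitOn.go [c] n rest (a :: cur) acc := by
          simp [PySem.Chars.splitOn.go, List.isPrefixOf, hb]
        rw [this, ih rest (a :: cur) acc (by simpa using Nat.lt_of_succ_lt_succ h)]
        rw [List.splitOnP_cons, hb]
        simp [List.modifyHead_modifyHead, Function.comp_def]

theorem pv_splitOn_single (c : Char) (l : List Char) :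
    PySem.Chars.splitOn l [c] = List.splitOnP (fun a => c == a) l := by
  unfold PySem.Chars.splitOn
  rw [pv_splitOn_go_single c (l.length + 1) l [] [] (by omega)]
  cases h : List.splitOnP (fun a => c == a) l with
  | nil => exact absurd h (List.splitOnP_ne_nil _ _)
  | cons x xs => simp

-- re-splitting every piece on a second separator = splitting once on the union
theorem pv_splitOnP_flatMap {α : Type} (p q : α → Bool) (l : List α) :
    (List.splitOnP p l).flatMap (List.splitOnP q) = List.splitOnP (fun c => p c || q c) l := by
  induction l with
  | nil => simp [List.splitOnP_nil]
  | cons a l ih =>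
    obtain ⟨h, t, hht⟩ : ∃ h t, List.splitOnP p l = h :: t := by
      cases hsp : List.splitOnP p l with
      | nil => exact absurd hsp (List.splitOnP_ne_nil _ _)
      | cons x xs => exact ⟨x, xs, rfl⟩
    rw [List.splitOnP_cons, List.splitOnP_cons]
    by_cases hp : p a = true
    · rw [if_pos hp, if_pos (by simp [hp]), List.flatMap_cons, List.splitOnP_nil, ih]
      rfl
    · have hp' : p a = false := by simpa using hp
      rw [if_neg hp, hht, List.modifyHead_cons, ← ih, hht]
      by_cases hq : q a = true
      · rw [if_pos (by simp [hp', hq]), List.flatMap_cons, List.flatMap_cons,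
          List.splitOnP_cons, if_pos hq]
        rfl
      · have hq' : q a = false := by simpa using hq
        rw [if_neg (by simp [hp', hq']), List.flatMap_cons, List.flatMap_cons,
          List.splitOnP_cons, if_neg hq,
          ← pv_modifyHead_append _ _ _ (List.splitOnP_ne_nil q h)]

-- the scanner is exactly split-on-separators followed by normalize-and-drop-empties
theorem pv_scan_eq (l : List Char) : ∀ cur : List Char,
    pvScan cur l = (List.modifyHead (cur ++ ·) (List.splitOnP pvIsSep l)).filterMap pvNorm? := by
  induction l with
  | nil =>
    intro cur
    simp only [pvScan, List.splitOnP_nil, List.modifyHead, List.append_nil, pvFlush_eq]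
    cases h : pvNorm? cur <;> simp [h]
  | cons c cs ih =>
    intro cur
    by_cases hs : pvIsSep c = true
    · simp only [pvScan, List.splitOnP_cons, hs, if_pos rfl]
      rw [ih []]
      have h0 : (fun x => ([] : List Char) ++ x) = id := by funext x; simp
      rw [h0, List.modifyHead_id]
      simp only [List.modifyHead]
      rw [pvFlush_eq]
      cases h : pvNorm? cur <;> simp [h]
    · have hs' : pvIsSep c = false := by simpa using hs
      simp only [pvScan, hs', Bool.false_eq_true, if_false, List.splitOnP_cons]
      rw [ih (cur ++ [c]), List.modifyHead_modifyHead]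
      congr 2
      funext x
      simp

-- the chunks A produces, at the character-list level
theorem pv_chunks_eq (s : String) :
    ([(" " : String), "-", "+", ","].foldl
      (fun out sep => out.foldl (fun new piece => new ++ pvStrSplit piece sep) []) [s])
    = (List.splitOnP pvIsSep s.toList).map String.ofList := by
  have hsplit : ∀ (sep : String) (c : Char), sep.toList = [c] → ∀ t : String,
      pvStrSplit t sep = (List.splitOnP (fun a => c == a) t.toList).map String.ofList := by
    intro sep c hc t
    rw [pvStrSplit, hc, pv_splitOn_single]
  have hset : ∀ (sep : String) (c : Char), sep.toList = [c] → ∀ xs : List (List Char),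
      (xs.map String.ofList).flatMap (fun piece => pvStrSplit piece sep)
        = (xs.flatMap (List.splitOnP (fun a => c == a))).map String.ofList := by
    intro sep c hc xs
    rw [List.flatMap_map, List.map_flatMap]
    congr 1
    funext cs
    rw [hsplit sep c hc, String.toList_ofList]
  have hbeq : ∀ (x y : Char), (x == y) = (y == x) := by
    intro x y
    by_cases h : x = y
    · subst h; rfl
    · simp [beq_eq_false_iff_ne, h, Ne.symm h]
  simp only [List.foldl, PySem.List.foldl_append_eq_flatMap, List.nil_append]
  rw [hsplit " " ' ' (by decide),
      hset "-" '-' (by decide), hset "+" '+' (by decide), hset "," ',' (by decide),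
      pv_splitOnP_flatMap, pv_splitOnP_flatMap, pv_splitOnP_flatMap]
  have hpred : (fun c => (' ' == c || '-' == c || '+' == c || ',' == c)) = pvIsSep := by
    funext a
    simp [pvIsSep, hbeq, Bool.or_assoc]
  rw [hpred]

theorem pv_ofList_eq_empty_iff (l : List Char) : (String.ofList l = "") ↔ l = [] := by
  constructor
  · intro h
    have := congrArg String.toList h
    simpa [String.toList_ofList] using this
  · intro h; subst h; rfl

-- Str-level strip().lower() equals the Chars-level normalization
theorem pv_norm_str (s : String) :
    PySem.Str.lower (PySem.Str.strip s) = String.ofList (PySem.Chars.lower (PySem.Chars.strip s.toList)) := by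
  have h : (PySem.Str.lower (PySem.Str.strip s)).toList
      = PySem.Chars.lower (PySem.Chars.strip s.toList) := by
    rw [PySem.Str.toList_lower, PySem.Str.toList_strip]
  calc PySem.Str.lower (PySem.Str.strip s)
      = String.ofList (PySem.Str.lower (PySem.Str.strip s)).toList := by rw [String.ofList_toList]
    _ = String.ofList (PySem.Chars.lower (PySem.Chars.strip s.toList)) := by rw [h]

-- A's filter-then-map over the chunks equals B's filterMap
theorem pv_tokens_eq (xs : List (List Char)) :
    ((xs.map String.ofList).filter (fun i => !(PySem.Str.lower (PySem.Str.strip i) == ""))).map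
      (fun i => PySem.Str.lower (PySem.Str.strip i))
    = xs.filterMap pvNorm? := by
  induction xs with
  | nil => simp
  | cons cs t ih =>
    simp only [List.map_cons, List.filter_cons]
    by_cases he : PySem.Chars.lower (PySem.Chars.strip cs) = []
    · have hcond : (!(PySem.Str.lower (PySem.Str.strip (String.ofList cs)) == "")) = false := by
        simp [pv_norm_str, String.toList_ofList, he]
      rw [hcond, if_neg (by simp), ih]
      simp [pvNorm?, he]
    · have hcond : (!(PySem.Str.lower (PySem.Str.strip (String.ofList cs)) == "")) = true := by
        simp only [pv_norm_str, String.toList_ofList, Bool.not_eq_true', beq_eq_false_iff_ne,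
          ne_eq, pv_ofList_eq_empty_iff]
        exact he
      rw [hcond, if_pos rfl, List.map_cons, ih]
      have hne : (PySem.Chars.lower (PySem.Chars.strip cs)).isEmpty = false := by
        simpa [List.isEmpty_iff] using he
      have hn : pvNorm? cs = some (String.ofList (PySem.Chars.lower (PySem.Chars.strip cs))) := by
        simp [pvNorm?, hne]
      simp [hn, pv_norm_str, String.toList_ofList]

-- stable insertion sort on a Bool key is the stable partition
theorem pv_insertBy_false {α : Type} (k : α → Bool) (x : α) (hx : k x = false)
    (F T : List α) (hF : ∀ y ∈ F, k y = false) (hT : ∀ y ∈ T, k y = true) :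
    PySem.List.insertBy (fun a b => decide (k a < k b)) x (F ++ T) = F ++ x :: T := by
  induction F with
  | nil =>
    cases T with
    | nil => simp [PySem.List.insertBy]
    | cons t ts =>
      have ht : k t = true := hT t (by simp)
      simp [PySem.List.insertBy, hx, ht]
  | cons f fs ih =>
    have hf : k f = false := hF f (by simp)
    simp only [List.cons_append, PySem.List.insertBy, hx, hf]
    rw [if_neg (by simp)]
    rw [ih (fun y hy => hF y (by simp [hy]))]

theorem pv_insertBy_true {α : Type} (k : α → Bool) (x : α) (hx : k x = true) (L : List α) :
    PySem.List.insertBy (fun a b => decide (k a < k b)) x L = L ++ [x] := by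
  apply PySem.List.insertBy_of_forall_not_before
  intro y _
  simp [hx]

theorem pv_foldl_partition {α : Type} (k : α → Bool) (xs : List α) :
    ∀ (F T : List α), (∀ y ∈ F, k y = false) → (∀ y ∈ T, k y = true) →
    xs.foldl (fun acc x => PySem.List.insertBy (fun a b => decide (k a < k b)) x acc) (F ++ T)
      = (F ++ xs.filter (fun x => !(k x))) ++ (T ++ xs.filter k) := by
  induction xs with
  | nil => intro F T _ _; simp
  | cons x xs ih =>
    intro F T hF hT
    simp only [List.foldl_cons]
    by_cases hk : k x = true
    · rw [pv_insertBy_true k x hk (F ++ T), List.append_assoc]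
      rw [ih F (T ++ [x]) hF (by intro y hy; rcases List.mem_append.mp hy with h | h
                                 · exact hT y h
                                 · simp at h; subst h; exact hk)]
      simp [hk, List.append_assoc]
    · have hk' : k x = false := by simpa using hk
      rw [pv_insertBy_false k x hk' F T hF hT]
      have : F ++ x :: T = (F ++ [x]) ++ T := by simp
      rw [this, ih (F ++ [x]) T (by intro y hy; rcases List.mem_append.mp hy with h | h
                                    · exact hF y h
                                    · simp at h; subst h; exact hk') hT]
      simp [hk', List.append_assoc]

theorem pv_sorted_bool {α : Type} (k : α → Bool) (xs : List α) :
    PySem.List.sorted xs k false = xs.filter (fun x => !(k x)) ++ xs.filter k := by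
  rw [PySem.List.sorted_eq_foldl_insertBy]
  have := pv_foldl_partition k xs [] [] (by simp) (by simp)
  simpa using this

-- ===== VERDICT (by name: the statement is the Claim_ definition above) =====
theorem tokenize_shortcut_string_py_spec : Claim_equal_tokenize_shortcut_string_py := by
  intro shortcut _
  show tokenize_shortcut_string_py shortcut = tokenize_shortcut_string_py_alt shortcut
  simp only [tokenize_shortcut_string_py, tokenize_shortcut_string_py_alt]
  rw [pv_chunks_eq, pv_tokens_eq, pv_sorted_bool, pv_scan_eq]
  have h0 : (fun x => ([] : List Char) ++ x) = id := by funext x; simp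
  rw [h0, List.modifyHead_id]
  simp [Bool.not_not]
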